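-- pv_equiv track=rewrite | github.com/RyanPioneer/Leetcode | 2001~2500/2222. Number of Ways to Select Buildings/main.py | numberOfWays
-- ===== SOURCE A (Python) =====
-- def numberOfWays(s: str) -> int:
--     dp, sz = [0 for _ in range(2)], len(s)
--     dp2 = [[0 for _ in range(2)] for _ in range(2)]
--     if s[0] == '0':
--         dp2[0][0] = 1
--     else:
--         dp2[1][0] = 1
--     for i in range(1, sz):
--         if s[i] == "0":
--             dp2[0][0] += 1
--             dp2[0][1] += dp2[1][0]
--             dp[0] = dp[0] + dp2[1][1]
--         else:
--             dp2[1][0] += 1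
--             dp2[1][1] += dp2[0][0]
--             dp[1] = dp[1] + dp2[0][1]
--
--     return sum(dp)
-- ===== SOURCE B (Python) =====
-- def numberOfWays(s: str) -> int:
--     # Middle-pivot: treat each position as the middle of the triple, using
--     # prefix counts and (total - prefix) suffix counts.  Single O(n) pass.
--     total0 = sum(c == '0' for c in s)
--     total1 = len(s) - total0
--     left0 = left1 = 0
--     ways = 0
--     for c in s:
--         if c == '0':
--             ways += left1 * (total1 - left1)
--             left0 += 1
--         else:
--             ways += left0 * (total0 - left0)
--             left1 += 1
--     return ways
-- ===== Notes on version B (the rewrite author's own statement) =====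
-- stated objective: alternative
-- what changed: B replaces A's pattern-DP (running counts of subsequence patterns '0','1','01','10','010','101') by a middle-pivot pass: precompute the total 0/1 counts, then for each index taken as the middle of the triple add left-count times right-count, the right side derived as total minus prefix.
import Mathlib
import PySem

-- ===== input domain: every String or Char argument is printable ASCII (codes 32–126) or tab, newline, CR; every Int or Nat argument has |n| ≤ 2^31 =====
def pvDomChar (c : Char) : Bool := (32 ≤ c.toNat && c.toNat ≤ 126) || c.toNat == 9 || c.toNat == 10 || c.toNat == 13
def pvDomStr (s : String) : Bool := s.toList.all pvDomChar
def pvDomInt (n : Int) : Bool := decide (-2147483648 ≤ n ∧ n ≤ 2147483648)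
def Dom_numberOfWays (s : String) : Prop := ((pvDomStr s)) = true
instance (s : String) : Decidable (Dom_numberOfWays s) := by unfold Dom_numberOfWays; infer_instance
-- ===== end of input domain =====

-- B counts the alternating length-3 subsequences by pivoting on the middle element
-- (prefix counts + totals) instead of A's six-counter pattern-DP; same O(n), alternative algorithm.

-- ===== PORT A =====
-- A's loop body; state = (dp[0], dp[1], dp2[0][0], dp2[0][1], dp2[1][0], dp2[1][1])
def numberOfWaysStepA (st : Int × Int × Int × Int × Int × Int) (c : Char) :
    Int × Int × Int × Int × Int × Int :=
  match st with
  | (dp0, dp1, c00, c01, c10, c11) =>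
    if c = '0' then (dp0 + c11, dp1, c00 + 1, c01 + c10, c10, c11)
    else (dp0, dp1 + c01, c00, c01, c10 + 1, c11 + c00)

def numberOfWays (s : String) : Int :=
  -- dp = [0,0]; sz = len(s); dp2 = [[0,0],[0,0]]
  let sz : Int := PySem.Str.len s
  -- if s[0] == '0': dp2[0][0] = 1 else: dp2[1][0] = 1   (s[0] raises on "", excluded by Pre_)
  let init : Int × Int × Int × Int × Int × Int :=
    if (PySem.Str.pyGet? s 0).getD ' ' = '0' then (0, 0, 1, 0, 0, 0) else (0, 0, 0, 0, 1, 0)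
  -- for i in range(1, sz): the if/else updates = numberOfWaysStepA on s[i]
  let st := (PySem.List.pyRange 1 sz 1).foldl
      (fun st i => numberOfWaysStepA st ((PySem.Str.pyGet? s i).getD ' ')) init
  -- return sum(dp)
  st.1 + st.2.1

-- ===== PORT B =====
-- B's loop body, parametrized by the total counts; state = (left0, left1, ways)
def numberOfWaysStepB (t0 t1 : Int) (st : Int × Int × Int) (c : Char) : Int × Int × Int :=
  match st with
  | (l0, l1, w) =>
    if c = '0' then (l0 + 1, l1, w + l1 * (t1 - l1))
    else (l0, l1 + 1, w + l0 * (t0 - l0))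

def numberOfWays_alt (s : String) : Int :=
  let total0 : Int := (s.toList.map (fun c => if c = '0' then (1 : Int) else 0)).sum
  let total1 : Int := PySem.Str.len s - total0
  let st := s.toList.foldl (numberOfWaysStepB total0 total1) (0, 0, 0)
  st.2.2

-- ===== PRECONDITION & SPEC =====
-- Pre_ excludes exactly the empty string, on which A raises IndexError at s[0].
def Pre_numberOfWays (s : String) : Prop := s ≠ ""
instance (s : String) : Decidable (Pre_numberOfWays s) := by unfold Pre_numberOfWays; infer_instance
def pvWitness_numberOfWays : String := "0102"

def Spec_numberOfWays (s : String) (out : Int) : Prop := out = numberOfWays_alt s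
instance (s : String) (out : Int) : Decidable (Spec_numberOfWays s out) := by unfold Spec_numberOfWays; infer_instance

-- ===== CLAIM (what is proved, stated in full; the proofs are below) =====
def Claim_equal_numberOfWays : Prop := ∀ (s : String), Dom_numberOfWays s → Pre_numberOfWays s → Spec_numberOfWays s (numberOfWays s)

-- ===== LEMMAS AND PROOFS =====

-- counting functions on the character list, recursing on the front
def zc : List Char → Int
  | [] => 0
  | c :: t => (if c = '0' then 1 else 0) + zc t

def oc : List Char → Int
  | [] => 0
  | c :: t => (if c = '0' then 0 else 1) + oc t

-- number of subsequences "01" (a '0' before a non-'0')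
def p01 : List Char → Int
  | [] => 0
  | c :: t => (if c = '0' then oc t else 0) + p01 t

-- number of subsequences "10"
def p10 : List Char → Int
  | [] => 0
  | c :: t => (if c = '0' then 0 else zc t) + p10 t

-- number of subsequences "010"
def t010 : List Char → Int
  | [] => 0
  | c :: t => (if c = '0' then p10 t else 0) + t010 t

-- number of subsequences "101"
def t101 : List Char → Int
  | [] => 0
  | c :: t => (if c = '0' then 0 else p01 t) + t101 t

-- invariant of A's fold: the final dp-sum in terms of the counting functions
lemma foldA_inv (l : List Char) (dp0 dp1 c00 c01 c10 c11 : Int) :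
    (let st := l.foldl numberOfWaysStepA (dp0, dp1, c00, c01, c10, c11); st.1 + st.2.1)
      = dp0 + dp1 + t010 l + t101 l + c11 * zc l + c01 * oc l + c00 * p10 l + c10 * p01 l := by
  induction l generalizing dp0 dp1 c00 c01 c10 c11 with
  | nil => simp [zc, oc, p01, p10, t010, t101]
  | cons c t ih =>
    by_cases h : c = '0' <;>
      simp [List.foldl_cons, numberOfWaysStepA, h, zc, oc, p01, p10, t010, t101, ih] <;> ring

-- invariant of B's fold: with consistent totals, the accumulator counts the triples
lemma foldB_inv (l : List Char) (t0 t1 l0 l1 w : Int)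
    (h0 : t0 = l0 + zc l) (h1 : t1 = l1 + oc l) :
    (l.foldl (numberOfWaysStepB t0 t1) (l0, l1, w)).2.2
      = w + t010 l + t101 l + l0 * p10 l + l1 * p01 l := by
  induction l generalizing l0 l1 w with
  | nil => simp [t010, t101, p10, p01]
  | cons c t ih =>
    by_cases h : c = '0'
    · have h0' : t0 = (l0 + 1) + zc t := by simp [zc, h] at h0 ⊢; linarith
      have h1' : t1 = l1 + oc t := by simp [oc, h] at h1 ⊢; linarith
      simp only [List.foldl_cons, numberOfWaysStepB, h, ite_true, ih _ _ _ h0' h1', p01, p10, t010, t101]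
      simp [h1']
      ring
    · have h0' : t0 = l0 + zc t := by simp [zc, h] at h0 ⊢; linarith
      have h1' : t1 = (l1 + 1) + oc t := by simp [oc, h] at h1 ⊢; linarith
      simp only [List.foldl_cons, numberOfWaysStepB, h, ite_false, ih _ _ _ h0' h1', p01, p10, t010, t101]
      simp [h0']
      ring

lemma sum_map_eq_zc (l : List Char) :
    (l.map (fun c => if c = '0' then (1 : Int) else 0)).sum = zc l := by
  induction l with
  | nil => rfl
  | cons c t ih => simp [zc, ih]

lemma zc_add_oc (l : List Char) : zc l + oc l = l.length := by
  induction l with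
  | nil => rfl
  | cons c t ih => by_cases h : c = '0' <;> simp [zc, oc, h] <;> omega

-- A's port rewritten: over a nonempty char list, it is the fold of stepA from the zero state
lemma portA_eq_fold (s : String) (c : Char) (t : List Char) (h : s.toList = c :: t) :
    numberOfWays s
      = (let st := (c :: t).foldl numberOfWaysStepA (0, 0, 0, 0, 0, 0); st.1 + st.2.1) := by
  have hget0 : PySem.Str.pyGet? s 0 = some c := by
    have := PySem.Str.pyGet?_natCast s 0
    simp only [Nat.cast_zero] at this
    rw [this, h]; rfl
  have hlen : PySem.Str.len s = (s.toList.length : Int) := PySem.Str.len_eq s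
  show (((PySem.List.pyRange 1 (PySem.Str.len s) 1).foldl
      (fun st i => numberOfWaysStepA st ((PySem.Str.pyGet? s i).getD ' '))
      (if (PySem.Str.pyGet? s 0).getD ' ' = '0' then ((0 : Int), (0 : Int), (1 : Int), (0 : Int), (0 : Int), (0 : Int)) else (0, 0, 0, 0, 1, 0))).1 +
    ((PySem.List.pyRange 1 (PySem.Str.len s) 1).foldl
      (fun st i => numberOfWaysStepA st ((PySem.Str.pyGet? s i).getD ' '))
      (if (PySem.Str.pyGet? s 0).getD ' ' = '0' then ((0 : Int), (0 : Int), (1 : Int), (0 : Int), (0 : Int), (0 : Int)) else (0, 0, 0, 0, 1, 0))).2.1) = _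
  -- replace the indexed range-fold by a fold over the dropped list
  have hfold : ∀ init : Int × Int × Int × Int × Int × Int,
      (PySem.List.pyRange 1 (PySem.Str.len s) 1).foldl
        (fun st i => numberOfWaysStepA st ((PySem.Str.pyGet? s i).getD ' ')) init
      = (s.toList.drop 1).foldl numberOfWaysStepA init := by
    intro init
    have hb : ∀ (st : Int × Int × Int × Int × Int × Int) (i : Int),
        numberOfWaysStepA st ((PySem.Str.pyGet? s i).getD ' ')
          = numberOfWaysStepA st (PySem.List.pyGetD s.toList i ' ') := by
      intro st i
      simp [PySem.List.pyGetD, PySem.Str.pyGet?_eq]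
    calc (PySem.List.pyRange 1 (PySem.Str.len s) 1).foldl
          (fun st i => numberOfWaysStepA st ((PySem.Str.pyGet? s i).getD ' ')) init
        = (PySem.List.pyRange 1 (PySem.List.len s.toList) 1).foldl
          (fun st i => numberOfWaysStepA st (PySem.List.pyGetD s.toList i ' ')) init := by
          rw [hlen]
          refine PySem.List.foldl_congr_mem _ _ _ _ (fun acc x _ => hb acc x) |>.trans ?_
          simp [PySem.List.len]
      _ = (s.toList.drop 1).foldl numberOfWaysStepA init :=
          PySem.List.foldl_pyRange_pyGetD s.toList ' ' numberOfWaysStepA init (by norm_num)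
  rw [hfold, hget0, h]
  simp only [List.drop_one, List.tail_cons, List.foldl_cons]
  by_cases hc : c = '0' <;> simp [numberOfWaysStepA, hc]

lemma portB_eq (s : String) :
    numberOfWays_alt s
      = (s.toList.foldl
          (numberOfWaysStepB (zc s.toList) ((s.toList.length : Int) - zc s.toList))
          (0, 0, 0)).2.2 := by
  show (s.toList.foldl
      (numberOfWaysStepB ((s.toList.map (fun c => if c = '0' then (1 : Int) else 0)).sum)
        (PySem.Str.len s - (s.toList.map (fun c => if c = '0' then (1 : Int) else 0)).sum))
      (0, 0, 0)).2.2 = _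
  rw [sum_map_eq_zc, PySem.Str.len_eq]

-- ===== VERDICT (by name: the statement is the Claim_ definition above) =====
theorem numberOfWays_spec : Claim_equal_numberOfWays := by
  intro s _ hpre
  unfold Spec_numberOfWays
  have hne : s.toList ≠ [] := fun hl =>
    hpre (by simpa [String.ofList_toList] using congrArg String.ofList hl)
  obtain ⟨c, t, h⟩ := List.exists_cons_of_ne_nil hne
  rw [portA_eq_fold s c t h, portB_eq s, h]
  rw [foldA_inv, foldB_inv (c :: t) _ _ _ _ _ (by ring)
      (by have := zc_add_oc (c :: t); linarith)]
  ring
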